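-- pv_equiv track=rewrite | github.com/pypi-data/pypi-mirror-397 | packages/numind/numind-0.2.0.tar.gz/numind-0.2.0/src/numind/numind.py | _parse_sse_string
-- ===== SOURCE A (Python) =====
-- def _parse_sse_string(raw: str) -> list[dict[str, str]]:
--     messages = []
--     msg = {}
--     data_buf = []
--     for line in raw.splitlines():
--         if not line.strip():  # blank line = end of message
--             if data_buf or msg:
--                 msg["data"] = "\n".join(data_buf)
--                 messages.append(msg)
--                 msg, data_buf = {}, []
--             continue
--
--         if line.startswith(":"):  # comment line
--             continue
--
--         field, _, value = line.partition(":")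
--         value = value.lstrip(" ")
--         if field == "data":
--             data_buf.append(value)
--         else:
--             msg[field] = value
--
--     # handle final pending message
--     if data_buf or msg:
--         msg["data"] = "\n".join(data_buf)
--         messages.append(msg)
--
--     return messages
-- ===== SOURCE B (Python) =====
-- def _parse_block(block):
--     """Parse one block of non-blank lines; None if it held no non-comment line."""
--     msg = {}
--     data = []
--     seen = False
--     for line in block:
--         if line.startswith(":"):  # comment line
--             continue
--         seen = True
--         field, _, value = line.partition(":")
--         value = value.lstrip(" ")
--         if field == "data":
--             data.append(value)
--         else:
--             msg[field] = value
--     if not seen: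
--         return None
--     msg["data"] = "\n".join(data)
--     return msg
--
--
-- def _parse_sse_string(raw: str) -> list:
--     # Phase 1: cut the input into blocks separated by whitespace-only lines.
--     blocks = []
--     cur = []
--     for line in raw.splitlines():
--         if not line.strip():
--             blocks.append(cur)
--             cur = []
--         else:
--             cur.append(line)
--     blocks.append(cur)
--     # Phase 2: parse each block independently; drop empty/comment-only blocks.
--     out = []
--     for block in blocks:
--         msg = _parse_block(block)
--         if msg is not None:
--             out.append(msg)
--     return out
-- ===== Notes on version B (the rewrite author's own statement) =====
-- stated objective: alternative
-- what changed: Single stateful loop with a flush-on-blank-line convention replaced by a two-phase decomposition: first cut the line list into blocks at whitespace-only lines, then parse each block independently with a helper that returns None for empty/comment-only blocks.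
import Mathlib
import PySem

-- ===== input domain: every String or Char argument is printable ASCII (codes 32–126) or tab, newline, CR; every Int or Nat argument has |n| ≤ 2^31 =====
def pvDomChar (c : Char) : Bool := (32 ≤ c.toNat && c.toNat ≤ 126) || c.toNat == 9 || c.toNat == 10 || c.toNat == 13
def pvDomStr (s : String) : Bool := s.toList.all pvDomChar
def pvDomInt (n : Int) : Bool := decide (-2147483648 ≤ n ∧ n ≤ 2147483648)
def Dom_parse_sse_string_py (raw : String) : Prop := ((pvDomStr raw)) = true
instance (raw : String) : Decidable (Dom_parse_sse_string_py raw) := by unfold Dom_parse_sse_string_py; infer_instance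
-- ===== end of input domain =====

-- B replaces A's single stateful flush-on-blank loop by a two-phase decomposition (cut into
-- blocks, then parse each block independently); same cost, alternative structure.

-- shared helpers for two Python primitives PySem does not provide:
-- `line.partition(":")` (split at the FIRST ':'; whole string and "" if absent) — exact
def pvPartitionColon (s : String) : String × String :=
  let cs := s.toList
  match cs.dropWhile (fun c => c ≠ ':') with
  | [] => (String.mk (cs.takeWhile (fun c => c ≠ ':')), "")
  | _ :: tl => (String.mk (cs.takeWhile (fun c => c ≠ ':')), String.mk tl)

-- `value.lstrip(" ")` (drop leading SPACE characters only) — exact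
def pvLstripSpaces (s : String) : String :=
  String.mk (s.toList.dropWhile (fun c => c = ' '))

-- ===== PORT A =====
-- A's for-loop over the lines, state = (messages, msg, data_buf); the [] case is the
-- final `if data_buf or msg` flush after the loop.
def parseSseLoopA : List String → List (List (String × String)) →
    PySem.Dict String String → List String → List (List (String × String))
  | [], messages, msg, dataBuf =>
      if dataBuf ≠ [] ∨ msg.items ≠ [] then
        messages ++ [(msg.insert "data" (PySem.Str.join "\n" dataBuf)).items]
      else messages
  | line :: rest, messages, msg, dataBuf =>
      if PySem.Str.strip line = "" then
        (if dataBuf ≠ [] ∨ msg.items ≠ [] then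
          parseSseLoopA rest
            (messages ++ [(msg.insert "data" (PySem.Str.join "\n" dataBuf)).items])
            PySem.Dict.empty []
        else parseSseLoopA rest messages msg dataBuf)
      else if PySem.Str.startswith line ":" then
        parseSseLoopA rest messages msg dataBuf
      else
        let fv := pvPartitionColon line
        let value := pvLstripSpaces fv.2
        if fv.1 = "data" then parseSseLoopA rest messages msg (dataBuf ++ [value])
        else parseSseLoopA rest messages (msg.insert fv.1 value) dataBuf

def parse_sse_string_py (raw : String) : List (List (String × String)) :=
  parseSseLoopA (PySem.Str.splitlines raw) [] PySem.Dict.empty []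

-- ===== PORT B =====
-- phase 1: cut the line list into blocks at whitespace-only lines (Source B's first loop)
def pvCutBlocks : List String → List String → List (List String)
  | [], cur => [cur]
  | l :: ls, cur =>
      if PySem.Str.strip l = "" then cur :: pvCutBlocks ls []
      else pvCutBlocks ls (cur ++ [l])

-- one iteration of _parse_block's loop, state = (msg, data, seen)
def pvBlockStep (st : PySem.Dict String String × List String × Bool) (line : String) :
    PySem.Dict String String × List String × Bool :=
  if PySem.Str.startswith line ":" then st
  else
    let fv := pvPartitionColon line
    let value := pvLstripSpaces fv.2
    if fv.1 = "data" then (st.1, st.2.1 ++ [value], true)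
    else (st.1.insert fv.1 value, st.2.1, true)

-- Source B's _parse_block: none for an empty / comment-only block
def pvParseBlock (block : List String) : Option (List (String × String)) :=
  let st := block.foldl pvBlockStep (PySem.Dict.empty, [], false)
  if st.2.2 then some ((st.1.insert "data" (PySem.Str.join "\n" st.2.1)).items) else none

def parse_sse_string_py_alt (raw : String) : List (List (String × String)) :=
  (pvCutBlocks (PySem.Str.splitlines raw) []).foldl
    (fun acc b => match pvParseBlock b with | some m => acc ++ [m] | none => acc) []

-- ===== PRECONDITION & SPEC =====
def Spec_parse_sse_string_py (raw : String) (out : List (List (String × String))) : Prop := out = parse_sse_string_py_alt raw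
instance (raw : String) (out : List (List (String × String))) : Decidable (Spec_parse_sse_string_py raw out) := by unfold Spec_parse_sse_string_py; infer_instance

-- ===== CLAIM (what is proved, stated in full; the proofs are below) =====
def Claim_equal_parse_sse_string_py : Prop := ∀ (raw : String), Dom_parse_sse_string_py raw → Spec_parse_sse_string_py raw (parse_sse_string_py raw)

-- ===== LEMMAS AND PROOFS =====

-- state of _parse_block's loop after a (possibly partial) block `cur`
def pvSt (cur : List String) : PySem.Dict String String × List String × Bool :=
  cur.foldl pvBlockStep (PySem.Dict.empty, [], false)

-- emit loop of phase 2, written structurally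
def pvEmitAll : List (List String) → List (List (String × String))
  | [] => []
  | b :: bs => match pvParseBlock b with | some m => m :: pvEmitAll bs | none => pvEmitAll bs

theorem pvFoldlEmit (bs : List (List String)) (acc : List (List (String × String))) :
    bs.foldl (fun acc b => match pvParseBlock b with | some m => acc ++ [m] | none => acc) acc
      = acc ++ pvEmitAll bs := by
  induction bs generalizing acc with
  | nil => simp [pvEmitAll]
  | cons b bs ih =>
      simp only [List.foldl_cons, pvEmitAll]
      cases h : pvParseBlock b <;> simp [h, ih]

theorem pvInsertItemsNeNil (d : PySem.Dict String String) (k : String) (v : String) :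
    (d.insert k v).items ≠ [] := by
  intro he
  have h : k ∈ (d.insert k v).keys := by
    rw [PySem.Dict.mem_keys_insert]; exact Or.inl rfl
  simp only [PySem.Dict.keys, he, List.map_nil] at h
  exact (List.not_mem_nil h)

-- invariant: `seen` is true exactly when data or msg is nonempty
theorem pvSeenInv : ∀ (cur : List String)
    (st : PySem.Dict String String × List String × Bool),
    (st.2.2 = true ↔ (st.2.1 ≠ [] ∨ st.1.items ≠ [])) →
    ((cur.foldl pvBlockStep st).2.2 = true ↔
      ((cur.foldl pvBlockStep st).2.1 ≠ [] ∨ (cur.foldl pvBlockStep st).1.items ≠ [])) := by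
  intro cur
  induction cur with
  | nil => intro st h; exact h
  | cons l ls ih =>
      intro st h
      simp only [List.foldl_cons]
      apply ih
      by_cases hc : PySem.Str.startswith l ":" = true
      · simp only [pvBlockStep, hc, if_true]
        exact h
      · by_cases hd : (pvPartitionColon l).1 = "data"
        · simp only [pvBlockStep, hc, if_false, hd, if_true]
          simp
        · simp only [pvBlockStep, hc, if_false, hd]
          simp [pvInsertItemsNeNil]

theorem pvSeenIff (cur : List String) :
    (pvSt cur).2.2 = true ↔ ((pvSt cur).2.1 ≠ [] ∨ (pvSt cur).1.items ≠ []) := by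
  apply pvSeenInv
  simp [PySem.Dict.empty]

theorem pvStNil : pvSt [] = (PySem.Dict.empty, [], false) := rfl

theorem pvStAppend (cur : List String) (l : String) :
    pvSt (cur ++ [l]) = pvBlockStep (pvSt cur) l := by
  simp [pvSt, List.foldl_append]

theorem pvParseBlockEq (b : List String) :
    pvParseBlock b = if (pvSt b).2.2 then
      some (((pvSt b).1.insert "data" (PySem.Str.join "\n" (pvSt b).2.1)).items)
    else none := rfl

-- main lemma: A's loop from the state of a partial block `cur` equals
-- ms ++ (phase-2 result on the blocks starting with `cur`)
theorem pvKey : ∀ (ls : List String) (ms : List (List (String × String))) (cur : List String),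
    parseSseLoopA ls ms (pvSt cur).1 (pvSt cur).2.1 = ms ++ pvEmitAll (pvCutBlocks ls cur) := by
  intro ls
  induction ls with
  | nil =>
      intro ms cur
      simp only [parseSseLoopA, pvCutBlocks, pvEmitAll, pvParseBlockEq]
      by_cases hs : (pvSt cur).2.2 = true
      · rw [if_pos ((pvSeenIff cur).mp hs), if_pos hs]
      · have h2 : ¬ ((pvSt cur).2.1 ≠ [] ∨ (pvSt cur).1.items ≠ []) :=
          fun hc => hs ((pvSeenIff cur).mpr hc)
        rw [if_neg h2, if_neg hs]
        simp
  | cons l ls ih =>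
      intro ms cur
      simp only [parseSseLoopA]
      by_cases hb : PySem.Str.strip l = ""
      · rw [if_pos hb]
        simp only [pvCutBlocks, if_pos hb, pvEmitAll, pvParseBlockEq]
        by_cases hs : (pvSt cur).2.2 = true
        · rw [if_pos ((pvSeenIff cur).mp hs), if_pos hs]
          have := ih (ms ++ [((pvSt cur).1.insert "data" (PySem.Str.join "\n" (pvSt cur).2.1)).items]) []
          rw [pvStNil] at this
          simp only [this, List.append_assoc, List.singleton_append]
        · have h2 : ¬ ((pvSt cur).2.1 ≠ [] ∨ (pvSt cur).1.items ≠ []) :=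
            fun hc => hs ((pvSeenIff cur).mpr hc)
          rw [if_neg h2, if_neg hs]
          push_neg at h2
          have hmsg : (pvSt cur).1 = PySem.Dict.empty := by
            apply PySem.Dict.ext; simpa [PySem.Dict.empty] using h2.2
          have hdata : (pvSt cur).2.1 = [] := h2.1
          have := ih ms []
          rw [pvStNil] at this
          rw [hmsg, hdata]
          exact this
      · rw [if_neg hb]
        simp only [pvCutBlocks, if_neg hb]
        by_cases hc : PySem.Str.startswith l ":" = true
        · rw [if_pos hc]
          have := ih ms (cur ++ [l])
          rw [pvStAppend] at this
          simp only [pvBlockStep, hc, if_true] at this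
          exact this
        · rw [if_neg hc]
          by_cases hd : (pvPartitionColon l).1 = "data"
          · simp only [hd, if_true]
            have := ih ms (cur ++ [l])
            rw [pvStAppend] at this
            simp only [pvBlockStep, hc, hd, Bool.false_eq_true, if_false, if_true] at this
            exact this
          · simp only [hd, Bool.false_eq_true, if_false]
            have := ih ms (cur ++ [l])
            rw [pvStAppend] at this
            simp only [pvBlockStep, hc, hd, Bool.false_eq_true, if_false] at this
            exact this

-- ===== VERDICT (by name: the statement is the Claim_ definition above) =====
theorem parse_sse_string_py_spec : Claim_equal_parse_sse_string_py := by
  intro raw _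
  unfold Spec_parse_sse_string_py parse_sse_string_py parse_sse_string_py_alt
  have := pvKey (PySem.Str.splitlines raw) [] []
  rw [pvStNil] at this
  rw [this, pvFoldlEmit]
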